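-- pv_equiv track=rewrite | github.com/Tajiboev/python_assignments | week-2/complexity.py | intersection_fast
-- ===== SOURCE A (Python) =====
-- def intersection_fast(A,B,C):
--     """
--     sleep() calls are delays of 0.3s
--     introduced to make you appreciate the compelxity of the the 2 solution
--     (this and slow below)
--     """
--
--     # O(n^2)
--     result = []
--     for i in A:
--         for j in B:
--             if i == j:
--                 for k in C:
--                     if k == j:
--                         result.append(k)
--     return result
-- ===== SOURCE B (Python) =====
-- def intersection_fast(A, B, C):
--     cb = {}
--     for j in B:
--         cb[j] = cb.get(j, 0) + 1
--     cc = {}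
--     for k in C:
--         cc[k] = cc.get(k, 0) + 1
--     result = []
--     for i in A:
--         result += [i] * (cb.get(i, 0) * cc.get(i, 0))
--     return result
-- ===== Notes on version B (the rewrite author's own statement) =====
-- stated objective: alternative
-- what changed: Replaces the triple nested scan with two count maps over B and C built once, then a single pass over A appending each element count_B*count_C times (linear plus output size, vs cubic scanning).
import Mathlib
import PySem

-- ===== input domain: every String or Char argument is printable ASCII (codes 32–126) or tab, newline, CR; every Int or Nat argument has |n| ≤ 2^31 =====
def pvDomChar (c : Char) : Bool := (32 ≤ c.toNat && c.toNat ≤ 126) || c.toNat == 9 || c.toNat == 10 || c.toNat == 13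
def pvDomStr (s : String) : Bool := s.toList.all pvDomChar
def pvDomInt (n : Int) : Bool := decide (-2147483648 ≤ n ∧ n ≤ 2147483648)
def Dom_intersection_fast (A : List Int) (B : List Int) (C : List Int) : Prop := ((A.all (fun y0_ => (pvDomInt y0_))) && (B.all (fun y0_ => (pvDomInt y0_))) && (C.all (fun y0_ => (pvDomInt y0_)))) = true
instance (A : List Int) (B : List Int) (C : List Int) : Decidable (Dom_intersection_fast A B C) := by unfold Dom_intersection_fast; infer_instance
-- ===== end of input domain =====

-- B replaces A's triple nested scan with two count maps (of B and C) built once and a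
-- single pass over A appending each element count_B * count_C times (objective: alternative).

-- ===== PORT A =====
def intersection_fast (A : List Int) (B : List Int) (C : List Int) : List Int :=
  A.foldl (fun result i =>
    B.foldl (fun result j =>
      if i == j then
        C.foldl (fun result k =>
          if k == j then result ++ [k] else result) result
      else result) result) []

-- ===== PORT B =====
def intersection_fast_alt (A : List Int) (B : List Int) (C : List Int) : List Int :=
  let cb := B.foldl (fun d j => d.insert j (d.getD j 0 + 1)) PySem.Dict.empty
  let cc := C.foldl (fun d k => d.insert k (d.getD k 0 + 1)) PySem.Dict.empty
  A.foldl (fun result i => result ++ PySem.List.pyRepeat [i] (cb.getD i 0 * cc.getD i 0)) []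

-- ===== PRECONDITION & SPEC =====
def Spec_intersection_fast (A : List Int) (B : List Int) (C : List Int) (out : List Int) : Prop := out = intersection_fast_alt A B C
instance (A : List Int) (B : List Int) (C : List Int) (out : List Int) : Decidable (Spec_intersection_fast A B C out) := by unfold Spec_intersection_fast; infer_instance

-- ===== CLAIM (what is proved, stated in full; the proofs are below) =====
def Claim_equal_intersection_fast : Prop := ∀ (A : List Int) (B : List Int) (C : List Int), Dom_intersection_fast A B C → Spec_intersection_fast A B C (intersection_fast A B C)

-- ===== LEMMAS AND PROOFS =====

-- A's innermost loop over C appends (count of j in C) copies of j.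
theorem innerC (C : List Int) (res : List Int) (j : Int) :
    C.foldl (fun res k => if k == j then res ++ [k] else res) res
      = res ++ List.replicate (C.count j) j := by
  rw [PySem.List.foldl_append_if_eq_filter, List.filter_beq]

-- A's middle loop over B contributes (count i B) * (count i C) copies of i.
theorem innerB (B : List Int) (C : List Int) (res : List Int) (i : Int) :
    B.foldl (fun res j =>
      if i == j then
        C.foldl (fun res k => if k == j then res ++ [k] else res) res
      else res) res
      = res ++ List.replicate (B.count i * C.count i) i := by
  induction B generalizing res with
  | nil => simp
  | cons j B ih =>
    simp only [List.foldl_cons, ih]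
    by_cases h : i = j
    · subst h
      simp only [BEq.rfl, if_true]
      rw [innerC, List.append_assoc, ← List.replicate_add]
      congr 2
      rw [List.count_cons_self]; ring
    · simp [h, beq_iff_eq, Ne.symm h]

-- Both programs equal the same flatMap.
theorem portA_flatMap (A B C : List Int) :
    intersection_fast A B C
      = A.flatMap (fun i => List.replicate (B.count i * C.count i) i) := by
  unfold intersection_fast
  have h : ∀ (res : List Int), ∀ i ∈ A,
      (B.foldl (fun result j =>
        if i == j then
          C.foldl (fun result k => if k == j then result ++ [k] else result) result
        else result) res)
        = res ++ List.replicate (B.count i * C.count i) i := fun res i _ => innerB B C res i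
  rw [PySem.List.foldl_congr_mem _ _ _ _ h, PySem.List.foldl_append_eq_flatMap]
  simp

theorem portB_flatMap (A B C : List Int) :
    intersection_fast_alt A B C
      = A.flatMap (fun i => List.replicate (B.count i * C.count i) i) := by
  unfold intersection_fast_alt
  simp only [PySem.Dict.foldl_insert_getD_add_one_eq_counter, PySem.Dict.getD_counter]
  have h : ∀ (res : List Int), ∀ i ∈ A,
      res ++ PySem.List.pyRepeat [i] ((B.count i : Int) * (C.count i : Int))
        = res ++ List.replicate (B.count i * C.count i) i := by
    intro res i _
    rw [PySem.List.pyRepeat_singleton, ← Nat.cast_mul, Int.toNat_natCast]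
  rw [PySem.List.foldl_congr_mem _ _ _ _ h, PySem.List.foldl_append_eq_flatMap]
  simp

-- ===== VERDICT (by name: the statement is the Claim_ definition above) =====
theorem intersection_fast_spec : Claim_equal_intersection_fast := by
  intro A B C _
  unfold Spec_intersection_fast
  rw [portA_flatMap, portB_flatMap]
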